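-- pv_equiv track=rewrite | github.com/ShimonWang/pythonpro | leetcode/面试/科大讯飞.py | median_sequence
-- ===== SOURCE A (Python) =====
-- import heapq
--
-- def median_sequence(arr):
--     max_heap = []  # 大根堆（用负数存储）
--     min_heap = []  # 小根堆
--     res = []
--
--     for num in arr:
--         # 先往大根堆放
--         heapq.heappush(max_heap, -num)
--         # 平衡：保证大根堆最大 <= 小根堆最小
--         if min_heap and -max_heap[0] > min_heap[0]:
--             val = -heapq.heappop(max_heap)
--             heapq.heappush(min_heap, val)
--
--         # 平衡大小
--         if len(max_heap) > len(min_heap) + 1: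
--             heapq.heappush(min_heap, -heapq.heappop(max_heap))
--         elif len(min_heap) > len(max_heap):
--             heapq.heappush(max_heap, -heapq.heappop(min_heap))
--
--     n = len(arr)
--     for _ in range(n):
--         if (len(max_heap) + len(min_heap)) % 2 == 1:
--             mid = -max_heap[0]   # 奇数长度
--         else:
--             mid = min(-max_heap[0], min_heap[0])  # 偶数长度
--
--         res.append(mid)
--
--         # 删除中位数
--         if mid == -max_heap[0]:
--             heapq.heappop(max_heap)
--         else:
--             heapq.heappop(min_heap)
--
--         # 重新平衡
--         if len(max_heap) > len(min_heap) + 1: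
--             heapq.heappush(min_heap, -heapq.heappop(max_heap))
--         elif len(min_heap) > len(max_heap):
--             heapq.heappush(max_heap, -heapq.heappop(min_heap))
--
--     return res
-- ===== SOURCE B (Python) =====
-- def median_sequence(arr):
--     s = sorted(arr)
--     n = len(s)
--     i = (n - 1) // 2
--     j = i + 1
--     res = []
--     while i >= 0 or j < n:
--         if i + 1 >= n - j:
--             res.append(s[i])
--             i -= 1
--         else:
--             res.append(s[j])
--             j += 1
--     return res
-- ===== Notes on version B (the rewrite author's own statement) =====
-- stated objective: faster
-- what changed: A simulates a running two-heap median structure and then repeatedly deletes the median from the heaps; B sorts the array once and emits the successive lower medians with a single center-out two-pointer pass over the sorted array.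
import Mathlib
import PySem

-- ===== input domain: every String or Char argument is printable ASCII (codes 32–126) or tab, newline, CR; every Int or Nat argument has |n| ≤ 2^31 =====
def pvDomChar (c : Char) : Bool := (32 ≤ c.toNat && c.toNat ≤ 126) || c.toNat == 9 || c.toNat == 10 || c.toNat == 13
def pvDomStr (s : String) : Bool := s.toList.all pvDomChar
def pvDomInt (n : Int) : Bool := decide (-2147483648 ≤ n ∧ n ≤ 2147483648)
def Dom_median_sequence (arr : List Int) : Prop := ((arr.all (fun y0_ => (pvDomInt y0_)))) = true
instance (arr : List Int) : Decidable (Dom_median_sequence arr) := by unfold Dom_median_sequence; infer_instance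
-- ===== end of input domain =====

-- B replaces A's two-heap running-median simulation by one sort followed by a center-out
-- two-pointer pass emitting the successive lower medians (measured constant-factor speedup).
-- In port A the heapq heaps are modeled as sorted lists (h[0] = heap minimum): observationally
-- exact, since A only reads h[0], the lengths and the multiset contents of the heaps.


-- ===== PORT A =====
-- heapq modeled on sorted lists: heappush = ordered insert, h[0] = head, heappop = drop the head.
def hpush (h : List Int) (x : Int) : List Int := List.orderedInsert (· ≤ ·) x h
def htop (h : List Int) : Int := h.headD 0

-- body of A's first loop (`for num in arr`)
def step1 (st : List Int × List Int) (num : Int) : List Int × List Int :=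
  let mh0 := hpush st.1 (-num)
  let p :=
    if st.2 ≠ [] ∧ -(htop mh0) > htop st.2 then
      (mh0.tail, hpush st.2 (-(htop mh0)))      -- val = -heappop(max_heap); heappush(min_heap, val)
    else (mh0, st.2)
  if p.1.length > p.2.length + 1 then (p.1.tail, hpush p.2 (-(htop p.1)))
  else if p.2.length > p.1.length then (hpush p.1 (-(htop p.2)), p.2.tail)
  else p

-- body of A's second loop (`for _ in range(n)`)
def step2 (st : (List Int × List Int) × List Int) : (List Int × List Int) × List Int :=
  let mh := st.1.1
  let mn := st.1.2
  let mid := if (mh.length + mn.length) % 2 = 1 then -(htop mh) else min (-(htop mh)) (htop mn)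
  let res := st.2 ++ [mid]
  let p := if mid = -(htop mh) then (mh.tail, mn) else (mh, mn.tail)
  if p.1.length > p.2.length + 1 then ((p.1.tail, hpush p.2 (-(htop p.1))), res)
  else if p.2.length > p.1.length then ((hpush p.1 (-(htop p.2)), p.2.tail), res)
  else (p, res)

def loop2 : Nat → (List Int × List Int) × List Int → (List Int × List Int) × List Int
  | 0, st => st
  | n + 1, st => loop2 n (step2 st)

def median_sequence (arr : List Int) : List Int :=
  (loop2 arr.length (arr.foldl step1 ([], []), [])).2

-- ===== PORT B =====
-- termination helper for bloop (cited by decreasing_by)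
theorem bloop_measure_left {n i j : Int} (hc : i ≥ 0 ∨ j < n) (hb : i + 1 ≥ n - j) :
    (i - 1 + 1).toNat + (n - j).toNat < (i + 1).toNat + (n - j).toNat := by omega

theorem bloop_measure_right {n i j : Int} (hc : i ≥ 0 ∨ j < n) (hb : ¬ i + 1 ≥ n - j) :
    (i + 1).toNat + (n - (j + 1)).toNat < (i + 1).toNat + (n - j).toNat := by omega

-- B's while loop
def bloop (s : List Int) (n i j : Int) (res : List Int) : List Int :=
  if hc : i ≥ 0 ∨ j < n then
    if hb : i + 1 ≥ n - j then
      bloop s n (i - 1) j (res ++ [PySem.List.pyGetD s i 0])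
    else
      bloop s n i (j + 1) (res ++ [PySem.List.pyGetD s j 0])
  else res
termination_by (i + 1).toNat + (n - j).toNat
decreasing_by
  · exact bloop_measure_left hc hb
  · exact bloop_measure_right hc hb

def median_sequence_alt (arr : List Int) : List Int :=
  let s := PySem.List.sorted arr (fun x => x) false
  let n : Int := (s.length : Int)
  let i := PySem.Int.floordiv (n - 1) 2
  bloop s n i (i + 1) []

-- ===== PRECONDITION & SPEC =====
def Spec_median_sequence (arr : List Int) (out : List Int) : Prop := out = median_sequence_alt arr
instance (arr : List Int) (out : List Int) : Decidable (Spec_median_sequence arr out) := by unfold Spec_median_sequence; infer_instance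

-- ===== CLAIM (what is proved, stated in full; the proofs are below) =====
def Claim_equal_median_sequence : Prop := ∀ (arr : List Int), Dom_median_sequence arr → Spec_median_sequence arr (median_sequence arr)

-- ===== LEMMAS AND PROOFS =====

-- `oi x t` = insert into a sorted list; `rn t` = the stored form of the max-heap holding
-- the values of `t` (negated, sorted ascending).
def oi (x : Int) (t : List Int) : List Int := List.orderedInsert (· ≤ ·) x t
def rn (t : List Int) : List Int := (t.map (fun x => -x)).reverse

-- canonical two-heap state for a sorted list s: lower ⌈l/2⌉ values in the max-heap
def canon (s : List Int) : List Int × List Int :=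
  (rn (s.take ((s.length + 1) / 2)), s.drop ((s.length + 1) / 2))

-- reference: successive lower medians of a sorted list
def medRec (s : List Int) : List Int :=
  match h : s with
  | [] => []
  | _ :: _ =>
    s.getD ((s.length - 1) / 2) 0 :: medRec (s.eraseIdx ((s.length - 1) / 2))
termination_by s.length
decreasing_by
  subst h
  rw [List.length_eraseIdx_of_lt (by simp; omega)]
  simp

-- basic facts --------------------------------------------------------------

theorem sorted_eq_of_perm {l m : List Int} (h : l.Perm m)
    (h1 : l.Pairwise (· ≤ ·)) (h2 : m.Pairwise (· ≤ ·)) : l = m :=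
  h.eq_of_pairwise (fun _ _ _ _ x y => le_antisymm x y) h1 h2

theorem oi_perm (x : Int) (t : List Int) : (oi x t).Perm (x :: t) := List.perm_orderedInsert _ x t

theorem oi_pairwise (x : Int) {t : List Int} (h : t.Pairwise (· ≤ ·)) :
    (oi x t).Pairwise (· ≤ ·) := List.Pairwise.orderedInsert x t h

theorem oi_length (x : Int) (t : List Int) : (oi x t).length = t.length + 1 :=
  List.orderedInsert_length _ t x

theorem mem_oi {x y : Int} {t : List Int} (h : y ∈ oi x t) : y = x ∨ y ∈ t :=
  (List.mem_orderedInsert _).mp h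

theorem rn_pairwise {t : List Int} (h : t.Pairwise (· ≤ ·)) : (rn t).Pairwise (· ≤ ·) := by
  unfold rn
  rw [List.pairwise_reverse]
  exact (List.pairwise_map.mpr (h.imp (by intro a b hab; simp; omega)))

theorem rn_length (t : List Int) : (rn t).length = t.length := by simp [rn]

theorem rn_oi {L : List Int} (hL : L.Pairwise (· ≤ ·)) (num : Int) :
    oi (-num) (rn L) = rn (oi num L) := by
  apply sorted_eq_of_perm
  · refine List.Perm.trans (oi_perm _ _) ?_
    refine List.Perm.trans (List.Perm.cons _ (List.reverse_perm _)) ?_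
    refine List.Perm.trans (((oi_perm num L).map (fun x => -x)).symm) ?_
    exact (List.reverse_perm _).symm
  · exact oi_pairwise _ (rn_pairwise hL)
  · exact rn_pairwise (oi_pairwise _ hL)

-- max / min of a sorted list
theorem le_getLast_of_sorted {l : List Int} (hs : l.Pairwise (· ≤ ·)) {a : Int} (h : a ∈ l)
    (hne : l ≠ []) : a ≤ l.getLast hne := by
  rcases (List.mem_append.mp (by rwa [List.dropLast_append_getLast hne] :
      a ∈ l.dropLast ++ [l.getLast hne])) with h' | h'
  · have hs' := hs; rw [← List.dropLast_append_getLast hne] at hs'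
    exact (List.pairwise_append.mp hs').2.2 a h' _ (List.mem_singleton_self _)
  · simp at h'; omega

theorem headD_le_of_sorted {l : List Int} (hs : l.Pairwise (· ≤ ·)) {a : Int} (h : a ∈ l) :
    l.headD 0 ≤ a ∨ l = [] := by
  cases l with
  | nil => right; rfl
  | cons x t =>
    left
    rcases List.mem_cons.mp h with h' | h'
    · simp [h']
    · simpa using (List.pairwise_cons.mp hs).1 a h'

-- htop of a stored max-heap reads the (negated) maximum
theorem htop_rn {t : List Int} (hne : t ≠ []) : htop (rn t) = -(t.getLast hne) := by
  unfold htop rn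
  rw [List.headD_eq_head?_getD, List.head?_reverse, List.getLast?_map,
    List.getLast?_eq_some_getLast hne]
  simp

theorem tail_rn (t : List Int) : (rn t).tail = rn t.dropLast := by
  unfold rn
  rw [List.tail_reverse, List.map_dropLast]

-- the splitting lemma: a sorted pair of blocks with matching multiset IS take/drop
theorem split_sorted {s u v : List Int} (hperm : (u ++ v).Perm s)
    (hs : s.Pairwise (· ≤ ·)) (hu : u.Pairwise (· ≤ ·)) (hv : v.Pairwise (· ≤ ·))
    (cross : ∀ x ∈ u, ∀ y ∈ v, x ≤ y) :
    u = s.take u.length ∧ v = s.drop u.length := by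
  have he : u ++ v = s :=
    sorted_eq_of_perm hperm (List.pairwise_append.mpr ⟨hu, hv, cross⟩) hs
  constructor
  · rw [← he, List.take_left]
  · rw [← he, List.drop_left]

-- phase-1 step preserves the canonical state
theorem step1_canon {s : List Int} (hs : s.Pairwise (· ≤ ·)) (num : Int) :
    step1 (canon s) num = canon (oi num s) := by
  rcases Nat.eq_zero_or_pos s.length with hl0 | hlpos
  · -- empty state
    rw [List.length_eq_zero_iff.mp hl0]
    show step1 (canon []) num = canon (oi num [])
    rw [show (canon [] : List Int × List Int) = ([], []) from rfl]
    simp only [step1]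
    rw [if_neg (show ¬ (([] : List Int) ≠ [] ∧ -(htop (hpush [] (-num))) > htop ([] : List Int)) by simp)]
    simp only
    rw [show hpush ([] : List Int) (-num) = [-num] from rfl]
    rw [if_neg (show ¬ ([-num].length > ([] : List Int).length + 1) by simp)]
    rw [if_neg (show ¬ (([] : List Int).length > [-num].length) by simp)]
    simp [canon, oi, rn, List.orderedInsert]
  · set l := s.length with hl
    set k := (l + 1) / 2 with hk
    have hkl : k ≤ l := by omega
    have hkpos : 0 < k := by omega
    set L := s.take k with hLdef
    set R := s.drop k with hRdef
    have hLR : L ++ R = s := List.take_append_drop k s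
    have hlenL : L.length = k := by rw [hLdef, List.length_take]; omega
    have hlenR : R.length = l - k := by rw [hRdef, List.length_drop]
    obtain ⟨hsL, hsR, hcross⟩ :=
      List.pairwise_append.mp (show (L ++ R).Pairwise (· ≤ ·) by rw [hLR]; exact hs)
    have hLne : L ≠ [] := by
      intro h; rw [h] at hlenL; simp at hlenL; omega
    set a := L.getLast hLne with ha
    have hxa : ∀ x ∈ L, x ≤ a := fun x hx => le_getLast_of_sorted hsL hx hLne
    have hbR : ∀ y ∈ R, R.headD 0 ≤ y := by
      intro y hy
      rcases headD_le_of_sorted hsR hy with h | h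
      · exact h
      · rw [h] at hy; simp at hy
    set b := R.headD 0 with hb
    have hne2 : oi num L ≠ [] := by
      have := oi_length num L
      intro h; rw [h] at this; simp at this
    set M := (oi num L).getLast hne2 with hM
    have hsOL : (oi num L).Pairwise (· ≤ ·) := oi_pairwise num hsL
    have hnumM : num ≤ M :=
      le_getLast_of_sorted hsOL ((List.mem_orderedInsert _).mpr (Or.inl rfl)) hne2
    have hMcase : M = num ∨ M ∈ L := mem_oi (List.getLast_mem hne2)
    have hOLlen : (oi num L).length = k + 1 := by rw [oi_length, hlenL]
    have hslen : (oi num s).length = l + 1 := by rw [oi_length]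
    have hsS : (oi num s).Pairwise (· ≤ ·) := oi_pairwise num hs
    have hperm_s : (oi num s).Perm (num :: (L ++ R)) := by rw [hLR]; exact oi_perm num s
    -- the first branch of step1, rewritten
    have hmh0 : hpush (rn L) (-num) = rn (oi num L) := rn_oi hsL num
    have htop0 : htop (rn (oi num L)) = -M := htop_rn hne2
    have hcanon : canon s = (rn L, R) := rfl
    rw [hcanon]
    simp only [step1]
    rw [hmh0, htop0, neg_neg]
    by_cases hcond : R ≠ [] ∧ num > b
    · -- the new element exceeds the min-heap head: it moves over at once
      obtain ⟨hRne, hnb⟩ := hcond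
      obtain ⟨hd, tl, hRc⟩ := List.exists_cons_of_ne_nil hRne
      have hhd : b = hd := by rw [hb, hRc]; rfl
      have hab : a ≤ b := hcross a (ha ▸ List.getLast_mem hLne) b (by rw [hhd, hRc]; exact List.mem_cons_self)
      have hMnum : M = num := by
        rcases hMcase with h | h
        · exact h
        · have := hxa M h
          omega
      rw [if_pos (show R ≠ [] ∧ M > htop R by
        constructor
        · exact hRne
        · show M > b
          omega)]
      simp only
      have hLnum : oi num L = L ++ [num] := by
        apply sorted_eq_of_perm ((oi_perm num L).trans (List.perm_append_singleton num L).symm)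
          hsOL
        rw [List.pairwise_append]
        exact ⟨hsL, List.pairwise_singleton _ _, fun x hx y hy => by
          rw [List.mem_singleton.mp hy]
          have := hxa x hx
          omega⟩
      have hdropOL : (oi num L).dropLast = L := by rw [hLnum, List.dropLast_concat]
      have hMn : M = num := hMnum
      rw [tail_rn, hdropOL, hMn]
      have hpR : hpush R num = oi num R := rfl
      rw [hpR]
      have hORlen : (oi num R).length = l - k + 1 := by rw [oi_length, hlenR]
      rw [if_neg (show ¬ (rn L).length > (oi num R).length + 1 by
        rw [rn_length, hlenL, hORlen]; omega)]
      have hoiR : oi num R = hd :: oi num tl := by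
        rw [hRc]
        show List.orderedInsert _ num (hd :: tl) = _
        rw [List.orderedInsert]
        rw [if_neg (by rw [hhd] at hnb; omega : ¬ num ≤ hd)]
        rfl
      by_cases heven : l % 2 = 0
      · rw [if_pos (show (oi num R).length > (rn L).length by
          rw [rn_length, hlenL, hORlen]; omega)]
        have htopOR : htop (oi num R) = hd := by rw [hoiR]; rfl
        have htailOR : (oi num R).tail = oi num tl := by rw [hoiR]; rfl
        rw [htopOR, htailOR]
        have hpushE : hpush (rn L) (-hd) = rn (oi hd L) := rn_oi hsL hd
        rw [hpushE]
        symm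
        have hsplit := split_sorted (s := oi num s) (u := oi hd L) (v := oi num tl)
          (by
            rw [List.perm_iff_count]
            intro c
            have h1 := (oi_perm hd L).count_eq c
            have h2 := (oi_perm num tl).count_eq c
            have h3 := hperm_s.count_eq c
            rw [hRc] at h3
            simp [List.count_append, List.count_cons] at *
            omega)
          hsS (oi_pairwise hd hsL) (oi_pairwise num (List.pairwise_cons.mp (hRc ▸ hsR)).2)
          (by
            intro x hx y hy
            have hxhd : x ≤ hd := by
              rcases mem_oi hx with rfl | hx'
              · omega
              · have h1 := hxa x hx'
                rw [hhd] at hab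
                omega
            rcases mem_oi hy with rfl | hy'
            · rw [hhd] at hnb; omega
            · exact le_trans hxhd ((List.pairwise_cons.mp (hRc ▸ hsR)).1 y hy'))
        have hulen : (oi hd L).length = k + 1 := by rw [oi_length, hlenL]
        show canon (oi num s) = (rn (oi hd L), oi num tl)
        unfold canon
        rw [hslen, show (l + 1 + 1) / 2 = k + 1 by omega,
          show k + 1 = (oi hd L).length from hulen.symm, ← hsplit.1, ← hsplit.2]
      · rw [if_neg (show ¬ (oi num R).length > (rn L).length by
          rw [rn_length, hlenL, hORlen]; omega)]
        symm
        have hsplit := split_sorted (s := oi num s) (u := L) (v := oi num R)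
          (by
            rw [List.perm_iff_count]
            intro c
            have h2 := (oi_perm num R).count_eq c
            have h3 := hperm_s.count_eq c
            simp [List.count_append, List.count_cons] at *
            omega)
          hsS hsL (oi_pairwise num hsR)
          (by
            intro x hx y hy
            have h1 := hxa x hx
            rcases mem_oi hy with rfl | hy'
            · omega
            · exact hcross x hx y hy')
        show canon (oi num s) = (rn L, oi num R)
        unfold canon
        rw [hslen, show (l + 1 + 1) / 2 = k by omega,
          show k = L.length from hlenL.symm, ← hsplit.1, ← hsplit.2]
    · -- the new element stays in (or below) the max heap
      have hnumR : ∀ y ∈ R, num ≤ y := by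
        intro y hy
        have hRne : R ≠ [] := by intro h; rw [h] at hy; simp at hy
        have hnb : ¬ num > b := fun h => hcond ⟨hRne, h⟩
        exact le_trans (by omega) (hbR y hy)
      have hMb : ∀ y ∈ R, M ≤ y := by
        intro y hy
        rcases hMcase with h | h
        · rw [h]; exact hnumR y hy
        · exact le_trans (hxa M h) (hcross a (ha ▸ List.getLast_mem hLne) y hy)
      have hcrossO : ∀ x ∈ oi num L, ∀ y ∈ R, x ≤ y := by
        intro x hx y hy
        rcases mem_oi hx with rfl | hx'
        · exact hnumR y hy
        · exact hcross x hx' y hy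
      rw [if_neg (show ¬ (R ≠ [] ∧ M > htop R) by
        rintro ⟨hRne, hMt⟩
        exact absurd (hMb (htop R) (by
          obtain ⟨hd, tl, hRc⟩ := List.exists_cons_of_ne_nil hRne
          rw [hRc]; exact List.mem_cons_self)) (by omega))]
      simp only
      by_cases hodd : l % 2 = 1
      · rw [if_pos (show (rn (oi num L)).length > R.length + 1 by
          rw [rn_length, hOLlen, hlenR]; omega)]
        rw [tail_rn, htop0, neg_neg]
        have hid : (oi num L).dropLast ++ [M] = oi num L := List.dropLast_append_getLast hne2
        have hsDL : (oi num L).dropLast.Pairwise (· ≤ ·) :=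
          List.Pairwise.sublist (List.dropLast_sublist _) hsOL
        have hpR : hpush R M = oi M R := rfl
        rw [hpR]
        symm
        have hsplit := split_sorted (s := oi num s) (u := (oi num L).dropLast) (v := oi M R)
          (by
            rw [List.perm_iff_count]
            intro c
            have h1 : ((oi num L).dropLast.count c) + ([M].count c) = (oi num L).count c := by
              rw [← List.count_append, hid]
            have h2 := (oi_perm M R).count_eq c
            have h3 := hperm_s.count_eq c
            have h4 := (oi_perm num L).count_eq c
            simp [List.count_append, List.count_cons] at *
            omega)
          hsS hsDL (oi_pairwise M hsR)
          (by
            intro x hx y hy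
            have hxM : x ≤ M :=
              le_getLast_of_sorted hsOL ((List.dropLast_sublist _).mem hx) hne2
            rcases mem_oi hy with rfl | hy'
            · exact hxM
            · exact hcrossO x ((List.dropLast_sublist _).mem hx) y hy')
        have hulen : (oi num L).dropLast.length = k := by
          rw [List.length_dropLast, hOLlen]
          omega
        show canon (oi num s) = (rn ((oi num L).dropLast), oi M R)
        unfold canon
        rw [hslen, show (l + 1 + 1) / 2 = k by omega,
          show k = (oi num L).dropLast.length from hulen.symm, ← hsplit.1, ← hsplit.2]
      · rw [if_neg (show ¬ (rn (oi num L)).length > R.length + 1 by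
          rw [rn_length, hOLlen, hlenR]; omega)]
        rw [if_neg (show ¬ R.length > (rn (oi num L)).length by
          rw [rn_length, hOLlen, hlenR]; omega)]
        symm
        have hsplit := split_sorted (s := oi num s) (u := oi num L) (v := R)
          (by
            rw [List.perm_iff_count]
            intro c
            have h3 := hperm_s.count_eq c
            have h4 := (oi_perm num L).count_eq c
            simp [List.count_append, List.count_cons] at *
            omega)
          hsS hsOL hsR hcrossO
        show canon (oi num s) = (rn (oi num L), R)
        unfold canon
        rw [hslen, show (l + 1 + 1) / 2 = k + 1 by omega,
          show k + 1 = (oi num L).length from hOLlen.symm, ← hsplit.1, ← hsplit.2]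

-- phase-2 step emits the lower median and keeps the state canonical
-- elements of a sorted L ++ R cross-compare; getLast of the left block is s[k-1]
theorem take_getLast_eq {s : List Int} {k : Nat} (hk : 0 < k) (hkl : k ≤ s.length)
    (h : s.take k ≠ []) : (s.take k).getLast h = s.getD (k - 1) 0 := by
  obtain ⟨m, rfl⟩ : ∃ m, k = m + 1 := ⟨k - 1, by omega⟩
  have hlt : m < s.length := by omega
  have ht : s.take (m + 1) = s.take m ++ [s[m]] := by
    rw [List.take_succ, List.getElem?_eq_getElem hlt]
    rfl
  rw [List.getD_eq_getElem s 0 (by omega : m + 1 - 1 < s.length)]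
  simp only [Nat.add_sub_cancel]
  have h2 := List.getLast?_eq_some_getLast h
  have h3 : (s.take (m + 1)).getLast? = some s[m] := by
    rw [ht]
    rw [List.getLast?_append]
    simp
  rw [h2] at h3
  exact Option.some.inj h3

theorem step2_canon {s : List Int} (hs : s.Pairwise (· ≤ ·)) (hne : s ≠ []) (res : List Int) :
    step2 (canon s, res) =
      (canon (s.eraseIdx ((s.length - 1) / 2)), res ++ [s.getD ((s.length - 1) / 2) 0]) := by
  have hlpos : 0 < s.length := List.length_pos_iff.mpr hne
  set l := s.length with hl
  set k := (l + 1) / 2 with hk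
  have hkl : k ≤ l := by omega
  have hkpos : 0 < k := by omega
  set L := s.take k with hLdef
  set R := s.drop k with hRdef
  have hLR : L ++ R = s := List.take_append_drop k s
  have hlenL : L.length = k := by rw [hLdef, List.length_take]; omega
  have hlenR : R.length = l - k := by rw [hRdef, List.length_drop]
  obtain ⟨hsL, hsR, hcross⟩ :=
    List.pairwise_append.mp (show (L ++ R).Pairwise (· ≤ ·) by rw [hLR]; exact hs)
  have hLne : L ≠ [] := by
    intro h; rw [h] at hlenL; simp at hlenL; omega
  have hidx : (l - 1) / 2 = k - 1 := by omega
  set a := L.getLast hLne with ha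
  have hgetD : s.getD ((l - 1) / 2) 0 = a := by
    rw [hidx, ha]
    exact (take_getLast_eq hkpos hkl hLne).symm
  -- the state after canonical unfold
  have hcanon : canon s = (rn L, R) := rfl
  have htopL : htop (rn L) = -a := htop_rn hLne
  -- the extracted median is a, and it always comes off the max heap
  have hmid : (if ((rn L).length + R.length) % 2 = 1 then -(htop (rn L))
      else min (-(htop (rn L))) (htop R)) = a := by
    rw [htopL, neg_neg]
    by_cases hpar : ((rn L).length + R.length) % 2 = 1
    · rw [if_pos hpar]
    · rw [if_neg hpar]
      have hRne : R ≠ [] := by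
        intro h0
        have h1 : R.length = 0 := by rw [h0]; rfl
        have h2 : (0 : Nat) = l - k := h1 ▸ hlenR
        rw [rn_length, hlenL, h1] at hpar
        omega
      obtain ⟨hd, tl, hR⟩ := List.exists_cons_of_ne_nil hRne
      have hab : a ≤ htop R := by
        rw [hR]
        exact hcross a (ha ▸ List.getLast_mem hLne) hd (by rw [hR]; exact List.mem_cons_self)
      exact min_eq_left hab
  -- erased list
  have herase : s.eraseIdx ((l - 1) / 2) = L.dropLast ++ R := by
    rw [hidx, ← hLR, List.eraseIdx_append_of_lt_length (by omega),
      show k - 1 = L.length - 1 by omega, ← List.eraseIdx_length_sub_one]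
  have hlenE : (L.dropLast ++ R).length = l - 1 := by
    simp [List.length_dropLast, hlenL, hlenR]
    omega
  have hsE : (L.dropLast ++ R).Pairwise (· ≤ ·) := by
    rw [← herase]
    exact List.Pairwise.sublist (List.eraseIdx_sublist s _) hs
  have hsDL : L.dropLast.Pairwise (· ≤ ·) := List.Pairwise.sublist (List.dropLast_sublist L) hsL
  -- unfold step2 and resolve the branches
  rw [hcanon]
  simp only [step2]
  rw [hmid, hgetD]
  rw [if_pos (show a = -htop (rn L) by rw [htopL, neg_neg])]
  simp only
  rw [tail_rn]
  rw [if_neg (show ¬ (rn L.dropLast).length > R.length + 1 by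
    rw [rn_length, List.length_dropLast, hlenL, hlenR]; omega)]
  by_cases heven : l % 2 = 0
  · -- even length: rebalance moves the head of the min heap over
    have hRne : R ≠ [] := by
      intro h0
      have h1 : (0 : Nat) = l - k := by rw [← hlenR, h0]; rfl
      omega
    obtain ⟨hd, tl, hRc⟩ := List.exists_cons_of_ne_nil hRne
    rw [if_pos (show R.length > (rn L.dropLast).length by
      rw [rn_length, List.length_dropLast, hlenL, hlenR]; omega)]
    have htopR : htop R = hd := by rw [hRc]; rfl
    have hpushE : hpush (rn L.dropLast) (-htop R) = rn (oi hd L.dropLast) := by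
      rw [htopR]
      exact rn_oi hsDL hd
    rw [hpushE, herase, hRc]
    have hsplit := split_sorted (s := L.dropLast ++ hd :: tl) (u := oi hd L.dropLast) (v := tl)
      (((oi_perm hd L.dropLast).append_right tl).trans List.perm_middle.symm)
      (by rw [← hRc]; exact hsE)
      (oi_pairwise hd hsDL)
      ((List.pairwise_cons.mp (hRc ▸ hsR)).2)
      (by
        intro x hx y hy
        have hhdy : hd ≤ y := (List.pairwise_cons.mp (hRc ▸ hsR)).1 y hy
        rcases mem_oi hx with rfl | hx'
        · exact hhdy
        · have hxL : x ∈ L := (List.dropLast_sublist L).mem hx'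
          exact le_trans (hcross x hxL hd (hRc ▸ List.mem_cons_self)) hhdy)
    have hulen : (oi hd L.dropLast).length = k := by
      rw [oi_length, List.length_dropLast, hlenL]; omega
    have hlenE' : (L.dropLast ++ hd :: tl).length = l - 1 := by rw [← hRc]; exact hlenE
    refine congrArg (fun p => (p, res ++ [a])) ?_
    symm
    show canon (L.dropLast ++ hd :: tl) = (rn (oi hd L.dropLast), tl)
    unfold canon
    rw [hlenE', show (l - 1 + 1) / 2 = k by omega, show k = (oi hd L.dropLast).length from hulen.symm,
      ← hsplit.1, ← hsplit.2]
  · -- odd length: no rebalance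
    rw [if_neg (show ¬ R.length > (rn L.dropLast).length by
      rw [rn_length, List.length_dropLast, hlenL, hlenR]; omega)]
    rw [herase]
    refine congrArg (fun p => (p, res ++ [a])) ?_
    symm
    show canon (L.dropLast ++ R) = (rn L.dropLast, R)
    unfold canon
    rw [hlenE, show (l - 1 + 1) / 2 = k - 1 by omega,
      show k - 1 = L.dropLast.length by rw [List.length_dropLast, hlenL],
      List.take_left, List.drop_left]

theorem medRec_cons {s : List Int} (h : s ≠ []) :
    medRec s = s.getD ((s.length - 1) / 2) 0 :: medRec (s.eraseIdx ((s.length - 1) / 2)) := by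
  cases s with
  | nil => exact absurd rfl h
  | cons a t => rw [medRec]

theorem eraseIdx_take {s : List Int} {L : Nat} (h : L ≤ s.length) (h0 : 0 < L) :
    (s.take L).eraseIdx (L - 1) = s.take (L - 1) := by
  obtain ⟨m, rfl⟩ : ∃ m, L = m + 1 := ⟨L - 1, by omega⟩
  have hm : m < s.length := by omega
  rw [List.take_succ, List.getElem?_eq_getElem hm]
  rw [show (m + 1 - 1) = m by omega,
    List.eraseIdx_append_of_length_le (by rw [List.length_take]; omega)]
  simp [List.length_take]
  omega

theorem loop2_canon : ∀ (n : Nat) (s res : List Int), s.length = n → s.Pairwise (· ≤ ·) →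
    (loop2 n (canon s, res)).2 = res ++ medRec s := by
  intro n
  induction n with
  | zero =>
    intro s res hlen _
    rw [List.length_eq_zero_iff.mp hlen]
    simp [loop2, canon, medRec]
  | succ n ih =>
    intro s res hlen hs
    have hne : s ≠ [] := by intro h; rw [h] at hlen; simp at hlen
    have hm : (s.length - 1) / 2 < s.length := by
      have : 0 < s.length := List.length_pos_iff.mpr hne
      omega
    show (loop2 n (step2 (canon s, res))).2 = res ++ medRec s
    rw [step2_canon hs hne res,
      ih _ _ (by rw [List.length_eraseIdx_of_lt hm]; omega)
        (List.Pairwise.sublist (List.eraseIdx_sublist s _) hs),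
      medRec_cons hne, List.append_assoc]
    rfl

theorem fold1_canon : ∀ (arr s : List Int), s.Pairwise (· ≤ ·) →
    arr.foldl step1 (canon s) = canon (arr.foldl (fun t x => oi x t) s) := by
  intro arr
  induction arr with
  | nil => intro s _; rfl
  | cons a t ih =>
    intro s hs
    simp only [List.foldl_cons]
    rw [step1_canon hs a]
    exact ih _ (oi_pairwise _ hs)

-- B's loop computes medRec of the remaining center block
theorem bloop_medRec : ∀ (s : List Int) (i j : Int) (res : List Int),
    s.Pairwise (· ≤ ·) → -1 ≤ i → i < j → j ≤ (s.length : Int) →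
    (i + 1) - ((s.length : Int) - j) ≥ -1 → (i + 1) - ((s.length : Int) - j) ≤ 1 →
    bloop s (s.length : Int) i j res =
      res ++ medRec (s.take (i + 1).toNat ++ s.drop j.toNat) := by
  intro s i j res hs hi hij hj hbal1 hbal2
  set l : Nat := s.length with hl
  set L : Nat := (i + 1).toNat with hLdef
  set R : Nat := l - j.toNat with hRdef
  have hjn : 0 ≤ j := by omega
  have hLle : L ≤ l := by omega
  have hRj : ((l : Int) - j) = (R : Int) := by omega
  have hlenr : (s.take L ++ s.drop j.toNat).length = L + R := by
    simp [List.length_take, List.length_drop]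
    omega
  rw [bloop]
  by_cases hc : i ≥ 0 ∨ j < (l : Int)
  · rw [dif_pos hc]
    have hrne : s.take L ++ s.drop j.toNat ≠ [] := by
      intro h
      rw [h] at hlenr
      simp at hlenr
      omega
    by_cases hb : i + 1 ≥ (l : Int) - j
    · -- left pick
      have hi0 : 0 ≤ i := by omega
      have hiL : i.toNat < l := by omega
      have hL1 : L - 1 < L := by omega
      rw [dif_pos hb]
      have hval : PySem.List.pyGetD s i 0 = s[i.toNat] := by
        rw [PySem.List.pyGetD_of_nonneg s 0 hi0, List.getD_eq_getElem s 0 hiL]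
      have hmid : ((s.take L ++ s.drop j.toNat).length - 1) / 2 = L - 1 := by
        rw [hlenr]; omega
      have hget : (s.take L ++ s.drop j.toNat).getD (L - 1) 0 = s[i.toNat] := by
        rw [List.getD_eq_getElem _ 0 (by rw [hlenr]; omega),
          List.getElem_append_left (by rw [List.length_take]; omega), List.getElem_take]
        congr 1
        omega
      have herase : (s.take L ++ s.drop j.toNat).eraseIdx (L - 1) =
          s.take (L - 1) ++ s.drop j.toNat := by
        rw [List.eraseIdx_append_of_lt_length (by rw [List.length_take]; omega),
          eraseIdx_take hLle (by omega)]
      rw [bloop_medRec s (i - 1) j (res ++ [PySem.List.pyGetD s i 0]) hs (by omega) (by omega)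
        (by omega) (by omega) (by omega)]
      rw [medRec_cons hrne, hmid, hget, herase, hval]
      have : (i - 1 + 1).toNat = L - 1 := by omega
      rw [this, List.append_assoc]
      rfl
    · -- right pick
      have hjl : j < (l : Int) := by
        rcases hc with h | h
        · by_contra hh
          omega
        · exact h
      have hjt : j.toNat < l := by omega
      rw [dif_neg hb]
      have hval : PySem.List.pyGetD s j 0 = s[j.toNat] := by
        rw [PySem.List.pyGetD_of_nonneg s 0 hjn, List.getD_eq_getElem s 0 hjt]
      have hmid : ((s.take L ++ s.drop j.toNat).length - 1) / 2 = L := by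
        rw [hlenr]; omega
      have hget : (s.take L ++ s.drop j.toNat).getD L 0 = s[j.toNat] := by
        rw [List.getD_eq_getElem _ 0 (by rw [hlenr]; omega),
          List.getElem_append_right (by rw [List.length_take]; omega)]
        rw [List.getElem_drop]
        congr 1
        simp [List.length_take]
        omega
      have herase : (s.take L ++ s.drop j.toNat).eraseIdx L =
          s.take L ++ s.drop (j.toNat + 1) := by
        rw [List.eraseIdx_append_of_length_le (by rw [List.length_take]; omega)]
        congr 1
        rw [show L - (s.take L).length = 0 by simp [List.length_take]; omega]
        rw [List.eraseIdx_zero, List.tail_drop]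
      rw [bloop_medRec s i (j + 1) (res ++ [PySem.List.pyGetD s j 0]) hs (by omega) (by omega)
        (by omega) (by omega) (by omega)]
      rw [medRec_cons hrne, hmid, hget, herase, hval]
      have : (j + 1).toNat = j.toNat + 1 := by omega
      rw [this, List.append_assoc]
      rfl
  · rw [dif_neg hc]
    have h1 : L = 0 := by omega
    have h2 : j.toNat = l := by omega
    rw [h1, h2]
    rw [List.take_zero, List.drop_length]
    simp [medRec]
termination_by s i j res => (i + 1).toNat + ((s.length : Int) - j).toNat
decreasing_by
  · exact bloop_measure_left hc hb
  · exact bloop_measure_right hc hb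

-- the insertion fold sorts
theorem foldl_oi_pairwise (arr : List Int) : ∀ s : List Int, s.Pairwise (· ≤ ·) →
    (arr.foldl (fun t x => oi x t) s).Pairwise (· ≤ ·) := by
  induction arr with
  | nil => intro s hs; exact hs
  | cons a t ih => intro s hs; exact ih _ (oi_pairwise _ hs)

theorem foldl_oi_perm (arr : List Int) : ∀ s : List Int,
    (arr.foldl (fun t x => oi x t) s).Perm (arr ++ s) := by
  induction arr with
  | nil => intro s; simp
  | cons a t ih =>
    intro s
    simp only [List.foldl_cons, List.cons_append]
    exact (ih (oi a s)).trans (((oi_perm a s).append_left t).trans (List.perm_middle))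

theorem sortedPy_eq (arr : List Int) :
    PySem.List.sorted arr (fun x => x) false = arr.foldl (fun t x => oi x t) [] := by
  exact PySem.List.sorted_id_eq_of_perm_of_pairwise arr _
    (by simpa using foldl_oi_perm arr []) (foldl_oi_pairwise arr [] List.Pairwise.nil)

-- ===== VERDICT (by name: the statement is the Claim_ definition above) =====
theorem median_sequence_spec : Claim_equal_median_sequence := by
  intro arr _
  unfold Spec_median_sequence median_sequence median_sequence_alt
  have hsort : (arr.foldl (fun t x => oi x t) []).Pairwise (· ≤ ·) :=
    foldl_oi_pairwise arr [] List.Pairwise.nil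
  have hlen : (arr.foldl (fun t x => oi x t) []).length = arr.length := by
    simpa using (foldl_oi_perm arr []).length_eq
  -- A computes medRec of the insertion-sorted list
  have hA : (loop2 arr.length (arr.foldl step1 ([], []), [])).2 =
      medRec (arr.foldl (fun t x => oi x t) []) := by
    have h0 : (([], []) : List Int × List Int) = canon [] := rfl
    rw [h0, fold1_canon arr [] List.Pairwise.nil,
      loop2_canon arr.length _ [] hlen hsort]
    rfl
  rw [hA, sortedPy_eq]
  set S := arr.foldl (fun t x => oi x t) [] with hS
  -- B computes the same
  show medRec S = bloop S (S.length : Int) (PySem.Int.floordiv ((S.length : Int) - 1) 2)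
    (PySem.Int.floordiv ((S.length : Int) - 1) 2 + 1) []
  rcases hm : S.length with _ | m
  · have hSe : S = [] := List.length_eq_zero_iff.mp hm
    rw [hSe]
    rw [bloop]
    rw [dif_neg (by decide)]
    simp [medRec]
  · have hfd : PySem.Int.floordiv (((m + 1 : Nat) : Int) - 1) 2 = ((m / 2 : Nat) : Int) := by
      rw [show (((m + 1 : Nat) : Int) - 1) = ((m : Nat) : Int) by push_cast; ring]
      exact_mod_cast PySem.Int.floordiv_natCast m 2
    rw [hfd, show ((m + 1 : Nat) : Int) = ((S.length : Nat) : Int) by rw [hm]]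
    rw [bloop_medRec S ((m / 2 : Nat) : Int) (((m / 2 : Nat) : Int) + 1) [] hsort
      (by omega) (by omega) (by rw [hm]; push_cast; omega) (by rw [hm]; push_cast; omega)
      (by rw [hm]; push_cast; omega)]
    rw [show ((((m / 2 : Nat) : Int)) + 1).toNat = m / 2 + 1 by omega]
    rw [List.take_append_drop]
    rfl
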